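-- pv_equiv track=rewrite | github.com/HugoFara/pylinkage | src/pylinkage/topology/enumeration.py | _is_degenerate
-- ===== SOURCE A (Python) =====
-- from itertools import combinations, permutations
--
-- def _is_degenerate(adj: tuple[tuple[int, ...], ...]) -> bool:
--     """Check if the chain contains a rigid sub-chain (DOF <= 0).
--
--     A kinematic chain is degenerate if any proper subset of k >= 3 links
--     has j' joints between them where j' > (3k-4)/2, i.e., the sub-chain
--     has DOF <= 0 when isolated. This includes triangles (k=3, j'=3) and
--     more complex rigid sub-structures.
--
--     Standard mechanism atlases (Mruthyunjaya 1984) exclude degenerate chains.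
--     """
--     n = len(adj)
--     for k in range(3, n):
--         max_joints = (3 * k - 4) // 2  # max joints for DOF >= 1
--         for subset in combinations(range(n), k):
--             # Count joints (edges) between links in this subset
--             joints = 0
--             for i in range(len(subset)):
--                 for j in range(i + 1, len(subset)):
--                     if adj[subset[i]][subset[j]]:
--                         joints += 1
--             if joints > max_joints:
--                 return True
--     return False
-- ===== SOURCE B (Python) =====
-- def _is_degenerate(adj):
--     """Include/exclude recursion over candidate links with incremental joint
--     counting from precomputed forward-neighbor sets (alternative to A's
--     per-k combinations enumeration with quadratic recounting)."""
--     n = len(adj)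
--     if n < 4:
--         return False
--     succ = [{b for b in range(a + 1, n) if adj[a][b]} for a in range(n)]
--
--     def dfs(cands, chosen, joints):
--         k = len(chosen)
--         if 3 <= k <= n - 1 and 2 * joints > 3 * k - 4:
--             return True
--         if not cands:
--             return False
--         v, rest = cands[0], cands[1:]
--         added = sum(1 for a in chosen if v in succ[a])
--         return dfs(rest, chosen + [v], joints + added) or dfs(rest, chosen, joints)
--
--     return dfs(list(range(n)), [], 0)
-- ===== Notes on version B (the rewrite author's own statement) =====
-- stated objective: alternative
-- what changed: A's per-size itertools.combinations enumeration with a quadratic nested-loop joint recount per subset is replaced by an include/exclude recursion over the candidate links that counts joints incrementally via precomputed forward-neighbor sets (succ[a] = {b > a : adj[a][b]}).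
-- outside the precondition, e.g. on _is_degenerate(((0, 1, 1, 1), (0, 0, 1), (), ())): A returns True, B raises IndexError
import Mathlib
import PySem

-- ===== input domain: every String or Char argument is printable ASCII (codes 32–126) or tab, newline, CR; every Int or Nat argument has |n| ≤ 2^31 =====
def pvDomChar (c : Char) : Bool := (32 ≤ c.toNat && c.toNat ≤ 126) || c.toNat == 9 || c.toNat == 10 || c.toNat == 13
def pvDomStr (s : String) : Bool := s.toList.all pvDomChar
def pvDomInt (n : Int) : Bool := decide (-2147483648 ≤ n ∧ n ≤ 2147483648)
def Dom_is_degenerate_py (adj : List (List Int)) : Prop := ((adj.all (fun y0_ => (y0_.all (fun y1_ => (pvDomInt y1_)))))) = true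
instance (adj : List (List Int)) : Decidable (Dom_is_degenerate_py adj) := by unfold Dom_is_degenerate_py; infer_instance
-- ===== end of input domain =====

-- B replaces A's per-k itertools.combinations enumeration (with a quadratic joint
-- recount per subset) by an include/exclude recursion over candidate links that
-- counts joints incrementally from precomputed forward-neighbor sets.

-- ===== PORT A =====
-- itertools.combinations(l, k) in lexicographic order
def pvCombos : List Nat → Nat → List (List Nat)
  | _, 0 => [[]]
  | [], _ + 1 => []
  | x :: xs, k + 1 => (pvCombos xs k).map (fun s => x :: s) ++ pvCombos xs (k + 1)

-- the nested "for i / for j in range(i+1, len)" counting loops; all indices are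
-- in range under Pre_, so getD is exact there
def pvCountJoints (adj : List (List Int)) (s : List Nat) : Int :=
  (List.range s.length).foldl
    (fun joints i =>
      (List.range' (i + 1) (s.length - (i + 1))).foldl
        (fun joints j =>
          if (adj.getD (s.getD i 0) []).getD (s.getD j 0) 0 ≠ 0 then joints + 1 else joints)
        joints)
    0

def is_degenerate_py (adj : List (List Int)) : Bool :=
  let n := adj.length
  (List.range' 3 (n - 3)).any fun k =>      -- for k in range(3, n)
    (pvCombos (List.range n) k).any fun subset =>
      pvCountJoints adj subset > PySem.Int.floordiv (3 * (k : Int) - 4) 2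

-- ===== PORT B =====
-- {b for b in range(a+1, n) if adj[a][b]}  (elements distinct by construction)
def pvSucc (adj : List (List Int)) (n a : Nat) : List Nat :=
  (List.range' (a + 1) (n - (a + 1))).filter fun b => (adj.getD a []).getD b 0 ≠ 0

-- sum(1 for a in chosen if v in succ[a])
def pvAdded (succ : List (List Nat)) (chosen : List Nat) (v : Nat) : Int :=
  chosen.foldl (fun acc a => if v ∈ succ.getD a [] then acc + 1 else acc) 0

-- 3 <= k <= n - 1 and 2 * joints > 3 * k - 4
def pvCheck (n k : Nat) (joints : Int) : Bool :=
  decide (3 ≤ k ∧ k ≤ n - 1) && decide (2 * joints > 3 * (k : Int) - 4)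

def pvDfs (n : Nat) (succ : List (List Nat)) : List Nat → List Nat → Int → Bool
  | [], chosen, joints => pvCheck n chosen.length joints
  | v :: rest, chosen, joints =>
    pvCheck n chosen.length joints
      || pvDfs n succ rest (chosen ++ [v]) (joints + pvAdded succ chosen v)
      || pvDfs n succ rest chosen joints

def is_degenerate_py_alt (adj : List (List Int)) : Bool :=
  let n := adj.length
  if n < 4 then false
  else pvDfs n ((List.range n).map (pvSucc adj n)) (List.range n) [] 0

-- ===== PRECONDITION & SPEC =====
-- Pre_ excludes ragged matrices with n >= 4 rows (some row shorter than n), on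
-- which both Pythons normally hit IndexError; A can still return True early on a
-- few of them (a rigid subset found before a short row is read), while B raises.
def Pre_is_degenerate_py (adj : List (List Int)) : Prop :=
  4 ≤ adj.length → ∀ row ∈ adj, adj.length ≤ row.length

instance (adj : List (List Int)) : Decidable (Pre_is_degenerate_py adj) := by
  unfold Pre_is_degenerate_py; infer_instance

def pvWitness_is_degenerate_py : List (List Int) :=
  [[0, 1, 1, 0], [0, 0, 1, 0], [0, 0, 0, 1], [0, 0, 0, 0]]

def Spec_is_degenerate_py (adj : List (List Int)) (out : Bool) : Prop := out = is_degenerate_py_alt adj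
instance (adj : List (List Int)) (out : Bool) : Decidable (Spec_is_degenerate_py adj out) := by unfold Spec_is_degenerate_py; infer_instance

-- ===== CLAIM (what is proved, stated in full; the proofs are below) =====
def Claim_equal_is_degenerate_py : Prop := ∀ (adj : List (List Int)), Dom_is_degenerate_py adj → Pre_is_degenerate_py adj → Spec_is_degenerate_py adj (is_degenerate_py adj)

-- ===== LEMMAS AND PROOFS =====

-- edge test shared by the proofs (not by the ports)
def pvEdge (adj : List (List Int)) (a b : Nat) : Bool :=
  decide ((adj.getD a []).getD b 0 ≠ 0)

-- number of position-ordered pairs of the subset joined by an edge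
def pvJN (adj : List (List Int)) : List Nat → Nat
  | [] => 0
  | a :: t => (t.filter (fun b => pvEdge adj a b)).length + pvJN adj t

def pvJ (adj : List (List Int)) (s : List Nat) : Int := (pvJN adj s : Int)

-- the common characterisation: some subset s of links is a rigid proper sub-chain
def pvGood (adj : List (List Int)) (n : Nat) (s : List Nat) : Prop :=
  3 ≤ s.length ∧ s.length ≤ n - 1 ∧ 2 * pvJ adj s > 3 * (s.length : Int) - 4

def pvGoodb (adj : List (List Int)) (n : Nat) (s : List Nat) : Bool :=
  decide (3 ≤ s.length) && decide (s.length ≤ n - 1) && decide (2 * pvJ adj s > 3 * (s.length : Int) - 4)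

def pvPb (adj : List (List Int)) : Bool :=
  ((List.range adj.length).sublists).any (fun s => pvGoodb adj adj.length s)

theorem pvGoodb_iff (adj : List (List Int)) (n : Nat) (s : List Nat) :
    pvGoodb adj n s = true ↔ pvGood adj n s := by
  simp [pvGoodb, pvGood, and_assoc]

theorem pvPb_iff (adj : List (List Int)) :
    pvPb adj = true ↔ ∃ s, List.Sublist s (List.range adj.length) ∧ pvGood adj adj.length s := by
  simp [pvPb, List.any_eq_true, List.mem_sublists, pvGoodb_iff]

theorem pvFilterIdxLen {α : Type} (p : α → Bool) (d : α) :
    ∀ t : List α, ((List.range t.length).filter (fun i => p (t.getD i d))).length = (t.filter p).length := by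
  intro t
  induction t with
  | nil => simp
  | cons a t ih =>
    have hmap : ((List.range t.length).map Nat.succ).filter (fun i => p ((a :: t).getD i d))
        = ((List.range t.length).filter (fun i => p (t.getD i d))).map Nat.succ := by
      rw [List.filter_map]; rfl
    rw [List.length_cons, List.range_succ_eq_map, List.filter_cons,
      List.filter_congr (l := (List.range t.length).map Nat.succ) (fun x _ => rfl), hmap]
    have ih' : (List.filter (fun i => p (t[i]?.getD d)) (List.range t.length)).length
        = (List.filter p t).length := by
      simpa [List.getD] using ih
    by_cases h : p a <;> simp [h, ih']

theorem pvInnerFold (adj : List (List Int)) (s : List Nat) (i : Nat) :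
    ∀ (L : List Nat) (a : Int),
      L.foldl (fun joints j =>
          if (adj.getD (s.getD i 0) []).getD (s.getD j 0) 0 ≠ 0 then joints + 1 else joints) a
        = a + ((L.filter (fun j => pvEdge adj (s.getD i 0) (s.getD j 0))).length : Int) := by
  intro L
  induction L with
  | nil => intro a; simp
  | cons x t ih =>
    intro a
    rw [List.foldl_cons, ih, List.filter_cons]
    by_cases h : (adj.getD (s.getD i 0) []).getD (s.getD x 0) 0 ≠ 0
    · rw [if_pos h, if_pos (show pvEdge adj (s.getD i 0) (s.getD x 0) = true from decide_eq_true h),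
        List.length_cons]
      push_cast; ring
    · rw [if_neg h, if_neg (show ¬ pvEdge adj (s.getD i 0) (s.getD x 0) = true from by
        simp only [pvEdge, decide_eq_true_eq]; exact h)]

theorem pvInnerIdx (p : Nat → Bool) (s : List Nat) (i : Nat) :
    ((List.range' (i + 1) (s.length - (i + 1))).filter (fun j => p (s.getD j 0))).length
      = ((s.drop (i + 1)).filter p).length := by
  rw [List.range'_eq_map_range, List.filter_map, List.length_map]
  have hc : s.length - (i + 1) = (s.drop (i + 1)).length := (List.length_drop).symm
  rw [hc, ← pvFilterIdxLen p 0 (s.drop (i + 1))]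
  apply congrArg
  apply List.filter_congr
  intro x _
  simp [Function.comp, List.getD, List.getElem?_drop]

theorem pvSumIdx (adj : List (List Int)) :
    ∀ s : List Nat,
      ((List.range s.length).map
          (fun i => ((s.drop (i + 1)).filter (fun b => pvEdge adj (s.getD i 0) b)).length)).sum
        = pvJN adj s := by
  intro s
  induction s with
  | nil => simp [pvJN]
  | cons a t ih =>
    rw [List.length_cons, List.range_succ_eq_map, List.map_cons, List.map_map, List.sum_cons]
    have h2 : ((List.range t.length).map
        ((fun i => (((a :: t).drop (i + 1)).filter (fun b => pvEdge adj ((a :: t).getD i 0) b)).length) ∘ Nat.succ))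
        = (List.range t.length).map (fun i => ((t.drop (i + 1)).filter (fun b => pvEdge adj (t.getD i 0) b)).length) := by
      apply List.map_congr_left
      intro i _
      simp [Function.comp]
    rw [h2, ih]
    simp [pvJN]

theorem pvCountJoints_eq (adj : List (List Int)) (s : List Nat) :
    pvCountJoints adj s = pvJ adj s := by
  unfold pvCountJoints
  simp only [pvInnerFold]
  rw [PySem.List.foldl_add]
  simp only [pvInnerIdx]
  rw [pvJ, ← pvSumIdx adj s, Nat.cast_list_sum, List.map_map]
  simp only [Function.comp_def]
  rw [zero_add]

theorem pvThreshold (j x : Int) : (j > PySem.Int.floordiv x 2) ↔ 2 * j > x := by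
  rw [PySem.Int.floordiv_eq_ediv_of_pos (by omega : (0:Int) < 2)]
  omega

theorem pvCombos_mem : ∀ (l : List Nat) (k : Nat) (s : List Nat),
    s ∈ pvCombos l k ↔ s.length = k ∧ List.Sublist s l := by
  intro l
  induction l with
  | nil =>
    intro k s
    cases k with
    | zero => simp [pvCombos, List.sublist_nil]
    | succ k =>
      simp only [pvCombos, List.not_mem_nil, false_iff]
      rintro ⟨hlen, hs⟩
      simp [List.sublist_nil] at hs
      subst hs; simp at hlen
  | cons x xs ih =>
    intro k s
    cases k with
    | zero =>
      simp only [pvCombos, List.mem_singleton]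
      constructor
      · rintro rfl; simp
      · rintro ⟨hlen, _⟩; exact List.length_eq_zero_iff.mp hlen
    | succ k =>
      simp only [pvCombos, List.mem_append, List.mem_map, ih]
      constructor
      · rintro (⟨t, ⟨hlen, hsub⟩, rfl⟩ | ⟨hlen, hsub⟩)
        · exact ⟨by simp [hlen], hsub.cons₂ x⟩
        · exact ⟨hlen, hsub.cons x⟩
      · rintro ⟨hlen, hsub⟩
        rcases List.sublist_cons_iff.mp hsub with h | ⟨r, rfl, hr⟩
        · exact Or.inr ⟨hlen, h⟩
        · exact Or.inl ⟨r, ⟨by simpa using hlen, hr⟩, rfl⟩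

theorem pvA_char (adj : List (List Int)) :
    is_degenerate_py adj = pvPb adj := by
  rw [Bool.eq_iff_iff, pvPb_iff]
  simp only [is_degenerate_py, List.any_eq_true, List.mem_range'_1, pvCombos_mem,
    decide_eq_true_eq, gt_iff_lt]
  constructor
  · rintro ⟨k, ⟨hk3, hkn⟩, s, ⟨hlen, hsub⟩, hcnt⟩
    refine ⟨s, hsub, ?_, ?_, ?_⟩
    · omega
    · omega
    · rw [pvCountJoints_eq] at hcnt
      have := (pvThreshold (pvJ adj s) (3 * (k : Int) - 4)).mp hcnt
      rw [hlen]; exact this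
  · rintro ⟨s, hsub, h3, hn1, hgt⟩
    refine ⟨s.length, ⟨h3, by omega⟩, s, ⟨rfl, hsub⟩, ?_⟩
    rw [pvCountJoints_eq]
    exact (pvThreshold (pvJ adj s) (3 * (s.length : Int) - 4)).mpr hgt

theorem pvCheck_iff (n k : Nat) (j : Int) :
    pvCheck n k j = true ↔ (3 ≤ k ∧ k ≤ n - 1 ∧ 2 * j > 3 * (k : Int) - 4) := by
  simp [pvCheck, and_assoc]

theorem pvAddedFold (succ : List (List Nat)) (v : Nat) :
    ∀ (L : List Nat) (acc : Int),
      L.foldl (fun acc a => if v ∈ succ.getD a [] then acc + 1 else acc) acc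
        = acc + ((L.filter (fun a => decide (v ∈ succ.getD a []))).length : Int) := by
  intro L
  induction L with
  | nil => intro acc; simp
  | cons x t ih =>
    intro acc
    rw [List.foldl_cons, ih, List.filter_cons]
    by_cases h : v ∈ succ.getD x []
    · rw [if_pos h, if_pos (decide_eq_true h), List.length_cons]
      push_cast; ring
    · rw [if_neg h, if_neg (by simp only [decide_eq_true_eq]; exact h)]

theorem pvSuccN_getD (adj : List (List Int)) (n a : Nat) (ha : a < n) :
    ((List.range n).map (pvSucc adj n)).getD a [] = pvSucc adj n a := by
  simp [List.getD, ha]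

theorem pvAdded_eq (adj : List (List Int)) (n : Nat) (chosen : List Nat) (v : Nat)
    (h : ∀ a ∈ chosen, a < v) (hv : v < n) :
    pvAdded ((List.range n).map (pvSucc adj n)) chosen v
      = ((chosen.filter (fun a => pvEdge adj a v)).length : Int) := by
  rw [pvAdded, pvAddedFold, zero_add]
  congr 2
  apply List.filter_congr
  intro a ha
  have hav : a < v := h a ha
  have han : a < n := lt_trans hav hv
  rw [pvSuccN_getD adj n a han]
  rw [decide_eq_decide.mpr]
  · rfl
  · simp only [pvSucc, List.mem_filter, List.mem_range'_1, decide_eq_true_eq]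
    constructor
    · rintro ⟨_, hb⟩; exact hb
    · intro hb; exact ⟨⟨by omega, by omega⟩, hb⟩

theorem pvJN_append (adj : List (List Int)) (v : Nat) :
    ∀ chosen : List Nat,
      pvJN adj (chosen ++ [v])
        = pvJN adj chosen + (chosen.filter (fun a => pvEdge adj a v)).length := by
  intro chosen
  induction chosen with
  | nil => simp [pvJN]
  | cons a t ih =>
    simp only [List.cons_append, pvJN, ih, List.filter_append, List.filter_cons,
      List.length_append]
    by_cases h : pvEdge adj a v = true <;> simp [h] <;> omega

theorem pvDfs_spec (adj : List (List Int)) : ∀ (c m : Nat) (chosen : List Nat),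
    m + c = adj.length → (∀ a ∈ chosen, a < m) →
    pvDfs adj.length ((List.range adj.length).map (pvSucc adj adj.length))
        (List.range' m c) chosen (pvJ adj chosen)
      = ((List.range' m c).sublists).any
          (fun ext => pvGoodb adj adj.length (chosen ++ ext)) := by
  intro c
  induction c with
  | zero =>
    intro m chosen _ _
    rw [Bool.eq_iff_iff]
    simp only [List.range'_zero, pvDfs, List.any_eq_true, List.mem_sublists,
      List.sublist_nil]
    constructor
    · intro h
      refine ⟨[], rfl, ?_⟩
      rw [List.append_nil, pvGoodb_iff]
      exact (pvCheck_iff _ _ _).mp h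
    · rintro ⟨e, rfl, hg⟩
      rw [List.append_nil, pvGoodb_iff] at hg
      exact (pvCheck_iff _ _ _).mpr hg
  | succ c ih =>
    intro m chosen hmc hlt
    rw [List.range'_succ, Bool.eq_iff_iff]
    have hmn : m < adj.length := by omega
    have hJ : pvJ adj chosen + pvAdded ((List.range adj.length).map (pvSucc adj adj.length)) chosen m
        = pvJ adj (chosen ++ [m]) := by
      rw [pvAdded_eq adj adj.length chosen m hlt hmn, pvJ, pvJ, pvJN_append]
      push_cast; ring
    have hinc := ih (m + 1) (chosen ++ [m]) (by omega)
      (by intro a ha; rcases List.mem_append.mp ha with h | h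
          · exact lt_trans (hlt a h) (Nat.lt_succ_self m)
          · simp at h; omega)
    have hexc := ih (m + 1) chosen (by omega)
      (fun a ha => lt_trans (hlt a ha) (Nat.lt_succ_self m))
    simp only [pvDfs, hJ, hinc, hexc, Bool.or_eq_true, List.any_eq_true,
      List.mem_sublists]
    constructor
    · rintro ((h | ⟨e, he, hg⟩) | ⟨e, he, hg⟩)
      · exact ⟨[], List.nil_sublist _, by rw [List.append_nil, pvGoodb_iff]; exact (pvCheck_iff _ _ _).mp h⟩
      · refine ⟨m :: e, he.cons₂ m, ?_⟩
        rwa [← List.singleton_append, ← List.append_assoc]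
      · exact ⟨e, he.cons m, hg⟩
    · rintro ⟨e, he, hg⟩
      rcases List.sublist_cons_iff.mp he with h | ⟨r, rfl, hr⟩
      · exact Or.inr ⟨e, h, hg⟩
      · refine Or.inl (Or.inr ⟨r, hr, ?_⟩)
        rwa [← List.singleton_append, ← List.append_assoc] at hg

theorem pvB_char (adj : List (List Int)) :
    is_degenerate_py_alt adj = pvPb adj := by
  by_cases h4 : adj.length < 4
  · simp only [is_degenerate_py_alt, if_pos h4]
    rw [eq_comm, Bool.eq_false_iff]
    intro hP
    rw [pvPb_iff] at hP
    rcases hP with ⟨s, hs, h3, hn, _⟩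
    omega
  · simp only [is_degenerate_py_alt, if_neg h4]
    have h0 : (0 : Int) = pvJ adj [] := rfl
    rw [h0]
    nth_rewrite 2 [List.range_eq_range']
    rw [pvDfs_spec adj adj.length 0 [] (by omega) (by simp)]
    simp only [pvPb, List.nil_append, List.range_eq_range']

-- ===== VERDICT (by name: the statement is the Claim_ definition above) =====
theorem is_degenerate_py_spec : Claim_equal_is_degenerate_py := by
  intro adj _ _
  unfold Spec_is_degenerate_py
  rw [pvA_char, pvB_char]
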